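-- pv_equiv track=rewrite | github.com/cms-sw/cmssw | HLTrigger/Configuration/python/Tools/confdb.py | consolidateNegativeList
-- ===== SOURCE A (Python) =====
-- def consolidateNegativeList(elements):
--   # consolidate a list of path exclusions and re-inclusions
--   # the result is the list of paths to be removed from the dump
--   result = set()
--   for element in elements:
--     if element[0] == '-':
--       result.add( element )
--     else:
--       result.discard( '-' + element )
--   return sorted( element for element in result )
-- ===== SOURCE B (Python) =====
-- def consolidateNegativeList(elements):
--   # single pass: map each base name to its most recent occurrence, then keep the negative ones
--   last = {}
--   for element in elements:
--     base = element[1:] if element[0] == '-' else element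
--     last[base] = element
--   return sorted(v for v in last.values() if v[0] == '-')
-- ===== Notes on version B (the rewrite author's own statement) =====
-- stated objective: simpler
-- what changed: Replaces incremental set add/discard bookkeeping by one last-occurrence-wins dict keyed by base name, filtering the negative survivors once at the end.
import Mathlib
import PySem

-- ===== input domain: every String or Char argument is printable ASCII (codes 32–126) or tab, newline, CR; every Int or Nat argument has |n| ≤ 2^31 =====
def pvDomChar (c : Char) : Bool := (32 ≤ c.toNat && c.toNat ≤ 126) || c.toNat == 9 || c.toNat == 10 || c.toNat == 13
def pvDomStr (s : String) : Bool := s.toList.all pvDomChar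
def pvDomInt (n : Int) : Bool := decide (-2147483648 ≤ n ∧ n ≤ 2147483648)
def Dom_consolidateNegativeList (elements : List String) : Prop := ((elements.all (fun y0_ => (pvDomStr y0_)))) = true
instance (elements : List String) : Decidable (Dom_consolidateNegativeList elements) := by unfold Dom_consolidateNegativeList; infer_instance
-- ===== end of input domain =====

-- B replaces A's incremental set add/discard by a single last-occurrence-wins dict keyed by
-- base name with one final filter; same cost, plainer data flow (objective: simpler).

-- ===== PORT A =====
def consolidateNegativeList (elements : List String) : List String :=
  let result : PySem.Set String := elements.foldl (fun result element =>
    if PySem.Str.pyGet? element 0 = some '-' then      -- element[0] == '-'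
      PySem.Set.add result element
    else
      PySem.Set.discard result (String.ofList ('-' :: element.toList)))   -- '-' + element (exact: string concat)
    PySem.Set.empty
  PySem.List.sorted result (fun x => x) false

-- ===== PORT B =====
def consolidateNegativeList_alt (elements : List String) : List String :=
  let last : PySem.Dict String String := elements.foldl (fun last element =>
    let base := if PySem.Str.pyGet? element 0 = some '-'
                then PySem.Str.slice element (some 1) none     -- element[1:]
                else element
    last.insert base element) PySem.Dict.empty
  PySem.List.sorted ((PySem.Dict.values last).filter
    (fun v => PySem.Str.pyGet? v 0 == some '-')) (fun x => x) false

-- ===== PRECONDITION & SPEC =====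
-- Pre_ excludes lists containing the empty string: there element[0] raises IndexError in A (and in B).
def Pre_consolidateNegativeList (elements : List String) : Prop := ∀ e ∈ elements, e ≠ ""
instance (elements : List String) : Decidable (Pre_consolidateNegativeList elements) := by unfold Pre_consolidateNegativeList; infer_instance
def pvWitness_consolidateNegativeList : List String := ["-A", "B", "-B", "B"]

def Spec_consolidateNegativeList (elements : List String) (out : List String) : Prop := out = consolidateNegativeList_alt elements
instance (elements : List String) (out : List String) : Decidable (Spec_consolidateNegativeList elements out) := by unfold Spec_consolidateNegativeList; infer_instance

-- ===== CLAIM (what is proved, stated in full; the proofs are below) =====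
def Claim_equal_consolidateNegativeList : Prop := ∀ (elements : List String), Dom_consolidateNegativeList elements → Pre_consolidateNegativeList elements → Spec_consolidateNegativeList elements (consolidateNegativeList elements)

-- ===== LEMMAS AND PROOFS =====

-- A's loop body
def pvStepA (result : PySem.Set String) (element : String) : PySem.Set String :=
  if PySem.Str.pyGet? element 0 = some '-' then PySem.Set.add result element
  else PySem.Set.discard result (String.ofList ('-' :: element.toList))

-- B's base-name computation and loop body
def pvBase (element : String) : String :=
  if PySem.Str.pyGet? element 0 = some '-'
  then PySem.Str.slice element (some 1) none else element

def pvStepB (last : PySem.Dict String String) (element : String) : PySem.Dict String String :=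
  last.insert (pvBase element) element

-- '-' + s
def pvMinus (s : String) : String := String.ofList ('-' :: s.toList)

lemma pvA_eq (elements : List String) :
    consolidateNegativeList elements =
      PySem.List.sorted (elements.foldl pvStepA PySem.Set.empty) (fun x => x) false := rfl

lemma pvB_eq (elements : List String) :
    consolidateNegativeList_alt elements =
      PySem.List.sorted
        ((PySem.Dict.values (elements.foldl pvStepB PySem.Dict.empty)).filter
          (fun v => PySem.Str.pyGet? v 0 == some '-')) (fun x => x) false := rfl

lemma pvNeg_iff (v : String) :
    PySem.Str.pyGet? v 0 = some '-' ↔ ∃ t, v.toList = '-' :: t := by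
  have h : PySem.Str.pyGet? v 0 = v.toList[0]? := by simp [PySem.List.pyGet?_zero]
  rw [h]
  cases hv : v.toList with
  | nil => simp
  | cons c t =>
    simp only [List.getElem?_cons_zero, Option.some.injEq, List.cons.injEq]
    constructor
    · rintro rfl; exact ⟨t, rfl, rfl⟩
    · rintro ⟨t', rfl, rfl⟩; rfl

lemma pvMinus_reconstruct (v : String) (h : PySem.Str.pyGet? v 0 = some '-') :
    pvMinus (pvBase v) = v := by
  obtain ⟨t, ht⟩ := (pvNeg_iff v).mp h
  apply String.toList_inj.mp
  simp [pvMinus, pvBase, PySem.Str.slice, PySem.List.slice_from_one, ht]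

lemma pvBase_minus (e : String) : pvBase (pvMinus e) = e := by
  apply String.toList_inj.mp
  simp [pvBase, PySem.Str.slice, PySem.List.slice_from_one, pvMinus]

lemma pvBase_of_not_neg (e : String) (h : ¬ PySem.Str.pyGet? e 0 = some '-') :
    pvBase e = e := by unfold pvBase; rw [if_neg h]

-- the joint loop invariant
lemma pv_inv (l : List String) (s : PySem.Set String) (d : PySem.Dict String String)
    (h1 : ∀ k v, d.get? k = some v → k = pvBase v)
    (h2 : ∀ v, v ∈ s ↔ (PySem.Str.pyGet? v 0 = some '-' ∧ d.get? (pvBase v) = some v))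
    (hs : s.Nodup) (hk : d.keys.Nodup) :
    (∀ k v, (l.foldl pvStepB d).get? k = some v → k = pvBase v) ∧
    (∀ v, v ∈ l.foldl pvStepA s ↔
      (PySem.Str.pyGet? v 0 = some '-' ∧ (l.foldl pvStepB d).get? (pvBase v) = some v)) ∧
    (l.foldl pvStepA s).Nodup ∧ (l.foldl pvStepB d).keys.Nodup := by
  induction l generalizing s d with
  | nil => exact ⟨h1, h2, hs, hk⟩
  | cons e l ih =>
    simp only [List.foldl_cons]
    apply ih
    · -- h1 preserved
      intro k v hget
      rw [pvStepB, PySem.Dict.get?_insert] at hget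
      split at hget
      · rename_i hkk; cases hget; exact hkk
      · exact h1 k v hget
    · -- h2 preserved
      intro v
      by_cases hne : PySem.Str.pyGet? e 0 = some '-'
      · have hA : pvStepA s e = PySem.Set.add s e := by unfold pvStepA; rw [if_pos hne]
        rw [hA, PySem.Set.mem_add, pvStepB, PySem.Dict.get?_insert]
        by_cases hb : pvBase v = pvBase e
        · rw [hb, if_pos rfl]
          constructor
          · rintro (hv | rfl)
            · have hneg := ((h2 v).mp hv).1
              have hve : v = e := by
                rw [← pvMinus_reconstruct v hneg, hb, pvMinus_reconstruct e hne]
              exact ⟨hneg, by rw [hve]⟩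
            · exact ⟨hne, rfl⟩
          · rintro ⟨hneg, he⟩
            right; cases he; rfl
        · rw [if_neg hb]
          constructor
          · rintro (hv | rfl)
            · exact (h2 v).mp hv
            · exact absurd rfl hb
          · intro hv; left; exact (h2 v).mpr hv
      · have hbe : pvBase e = e := pvBase_of_not_neg e hne
        have hA : pvStepA s e = PySem.Set.discard s (String.ofList ('-' :: e.toList)) := by
          unfold pvStepA; rw [if_neg hne]
        have hmin : String.ofList ('-' :: e.toList) = pvMinus e := rfl
        rw [hA, hmin, PySem.Set.mem_discard, pvStepB, PySem.Dict.get?_insert, hbe]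
        by_cases hb : pvBase v = e
        · rw [hb, if_pos rfl]
          constructor
          · rintro ⟨hv, hvne⟩
            have hneg := ((h2 v).mp hv).1
            exact absurd (by rw [← pvMinus_reconstruct v hneg, hb]) hvne
          · rintro ⟨hneg, he⟩
            cases he; exact absurd hneg hne
        · rw [if_neg hb]
          constructor
          · rintro ⟨hv, _⟩; exact (h2 v).mp hv
          · intro hv
            refine ⟨(h2 v).mpr hv, fun hvm => ?_⟩
            rw [hvm, pvBase_minus] at hb; exact hb rfl
    · -- set stays Nodup
      rw [pvStepA]; split
      · exact PySem.Set.nodup_add _ _ hs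
      · exact PySem.Set.nodup_discard _ _ hs
    · -- keys stay Nodup
      exact PySem.Dict.nodup_keys_insert _ _ _ hk

-- ===== VERDICT (by name: the statement is the Claim_ definition above) =====
theorem consolidateNegativeList_spec : Claim_equal_consolidateNegativeList := by
  intro elements _ _
  unfold Spec_consolidateNegativeList
  rw [pvA_eq, pvB_eq]
  obtain ⟨inv1, inv2, hsnd, hknd⟩ :=
    pv_inv elements PySem.Set.empty PySem.Dict.empty
      (by intro k v h; simp [PySem.Dict.get?_empty] at h)
      (by intro v; simp [PySem.Set.empty, PySem.Dict.get?_empty])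
      (by simp [PySem.Set.empty]) (by simp [PySem.Dict.keys_empty])
  set D := elements.foldl pvStepB PySem.Dict.empty with hD
  set S := elements.foldl pvStepA PySem.Set.empty with hS
  have hkeysmap : (D.items.map (fun p => p.1)).Nodup := hknd
  have hitems : D.items.Nodup := List.Nodup.of_map _ hkeysmap
  have hvalsmap : D.values = D.items.map (fun p => p.2) := rfl
  have hinj : ∀ p ∈ D.items, ∀ q ∈ D.items, p.2 = q.2 → p = q := by
    intro p hp q hq hpq
    have hgp := PySem.Dict.get?_of_mem_items _ hp hknd
    have hgq := PySem.Dict.get?_of_mem_items _ hq hknd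
    have h1p := inv1 _ _ hgp
    have h1q := inv1 _ _ hgq
    have hfst : p.1 = q.1 := by rw [h1p, h1q, hpq]
    exact List.inj_on_of_nodup_map hkeysmap hp hq hfst
  have hvals : D.values.Nodup := by rw [hvalsmap]; exact hitems.map_on hinj
  symm
  apply (PySem.List.sorted_id_eq_sorted_id_iff_perm _ _).mpr
  apply (List.perm_ext_iff_of_nodup (hvals.filter _) hsnd).mpr
  intro a
  simp only [List.mem_filter, beq_iff_eq]
  constructor
  · rintro ⟨hav, hneg⟩
    rw [hvalsmap, List.mem_map] at hav
    obtain ⟨p, hp, rfl⟩ := hav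
    have hg := PySem.Dict.get?_of_mem_items _ hp hknd
    have hb := inv1 _ _ hg
    exact (inv2 p.2).mpr ⟨hneg, hb ▸ hg⟩
  · intro ha
    obtain ⟨hneg, hget⟩ := (inv2 a).mp ha
    refine ⟨?_, hneg⟩
    have hmem := PySem.Dict.mem_items_of_get?_eq_some _ hget
    rw [hvalsmap, List.mem_map]
    exact ⟨_, hmem, rfl⟩
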